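-- pv_equiv track=rewrite | github.com/AleVlaKon/algorytm | 6/6.2.6.py | lowercase_before_uppercase
-- ===== SOURCE A (Python) =====
-- def lowercase_before_uppercase(s: str) -> bool:
--     char_index = 0
--     while s[char_index] == s[char_index].lower():
--         if char_index != len(s) - 1:
--             char_index += 1
--         else:
--             break
--     for char in range(char_index+1, len(s)):
--         if s[char] == s[char].lower():
--             return False
--     return True
-- ===== SOURCE B (Python) =====
-- def lowercase_before_uppercase(s: str) -> bool:
--     seen_upper = s[0] != s[0].lower()
--     for c in s[1:]:
--         if c != c.lower():
--             seen_upper = True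
--         elif seen_upper:
--             return False
--     return True
-- ===== Notes on version B (the rewrite author's own statement) =====
-- stated objective: simpler
-- what changed: Replaces A's two sequential phases (an index-based while loop skipping the lowercase run, then a second index loop verifying the remainder) with one direct pass over the characters maintaining a seen_upper flag.
import Mathlib
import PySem

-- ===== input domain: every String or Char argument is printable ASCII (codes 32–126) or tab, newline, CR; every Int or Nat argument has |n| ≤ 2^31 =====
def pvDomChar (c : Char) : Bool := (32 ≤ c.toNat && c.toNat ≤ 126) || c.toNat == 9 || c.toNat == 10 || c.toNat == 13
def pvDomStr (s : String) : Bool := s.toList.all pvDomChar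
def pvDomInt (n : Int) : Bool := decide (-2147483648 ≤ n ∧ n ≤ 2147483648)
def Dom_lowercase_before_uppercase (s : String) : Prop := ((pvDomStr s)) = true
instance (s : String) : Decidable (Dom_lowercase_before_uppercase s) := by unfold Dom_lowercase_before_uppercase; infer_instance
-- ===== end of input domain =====

-- B replaces A's two sequential phases (skip-lowercase while loop, then verify loop) with one flag-driven pass; objective: simpler. Pre_ excludes only the empty string, on which A raises IndexError.


-- ===== PORT A =====
-- the while loop: advance char_index while s[char_index] is its own lowercase, stopping at the last index
def lbuWhile (cs : List Char) (i : Nat) : Nat :=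
  if h : i < cs.length then
    if cs[i] = PySem.Chars.lowerChar cs[i] then
      if i ≠ cs.length - 1 then lbuWhile cs (i + 1) else i
    else i
  else i  -- unreachable under Pre_ (Python raises IndexError on the empty string)
termination_by cs.length - i

-- the for loop over range(char_index+1, len(s)) with its early return False
def lbuFor (cs : List Char) (j : Nat) : Bool :=
  if h : j < cs.length then
    if cs[j] = PySem.Chars.lowerChar cs[j] then false else lbuFor cs (j + 1)
  else true
termination_by cs.length - j

def lowercase_before_uppercase (s : String) : Bool :=
  let cs := s.toList
  lbuFor cs (lbuWhile cs 0 + 1)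

-- ===== PORT B =====
-- single pass carrying the seen_upper flag over s[1:]
def lbuFlag (cs : List Char) (seenUpper : Bool) : Bool :=
  match cs with
  | [] => true
  | c :: rest =>
    if c ≠ PySem.Chars.lowerChar c then lbuFlag rest true
    else if seenUpper then false
    else lbuFlag rest seenUpper

def lowercase_before_uppercase_alt (s : String) : Bool :=
  match s.toList with
  | [] => true  -- unreachable under Pre_ (Python raises IndexError on s[0])
  | c :: rest => lbuFlag rest (decide (c ≠ PySem.Chars.lowerChar c))

-- ===== PRECONDITION & SPEC =====
-- Pre_ excludes exactly the empty string, where both Pythons raise IndexError.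
def Pre_lowercase_before_uppercase (s : String) : Prop := s ≠ ""
instance (s : String) : Decidable (Pre_lowercase_before_uppercase s) := by unfold Pre_lowercase_before_uppercase; infer_instance
def pvWitness_lowercase_before_uppercase : String := "abC"

def Spec_lowercase_before_uppercase (s : String) (out : Bool) : Prop := out = lowercase_before_uppercase_alt s
instance (s : String) (out : Bool) : Decidable (Spec_lowercase_before_uppercase s out) := by unfold Spec_lowercase_before_uppercase; infer_instance

-- ===== CLAIM (what is proved, stated in full; the proofs are below) =====
def Claim_equal_lowercase_before_uppercase : Prop := ∀ (s : String), Dom_lowercase_before_uppercase s → Pre_lowercase_before_uppercase s → Spec_lowercase_before_uppercase s (lowercase_before_uppercase s)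

-- ===== LEMMAS AND PROOFS =====

-- the verify loop of A checks that no remaining character is its own lowercase,
-- which is exactly B's pass with the flag already set
theorem lbuFor_eq_flag_true (cs : List Char) (j : Nat) :
    lbuFor cs j = lbuFlag (cs.drop j) true := by
  fun_induction lbuFor cs j with
  | case1 j h hl =>
    rw [List.drop_eq_getElem_cons h]
    show false = (if cs[j] ≠ PySem.Chars.lowerChar cs[j] then lbuFlag (cs.drop (j + 1)) true
                  else if (true : Bool) then false else lbuFlag (cs.drop (j + 1)) true)
    rw [if_neg (not_not_intro hl)]
    rfl
  | case2 j h hl ih =>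
    rw [List.drop_eq_getElem_cons h]
    simp [lbuFlag, hl, ih]
  | case3 j h =>
    rw [List.drop_eq_nil_of_le (by omega)]
    simp [lbuFlag]

-- B's pass on a cons with the flag still clear, written with the flag of the head
theorem lbuFlag_head (c : Char) (rest : List Char) :
    lbuFlag (c :: rest) false = lbuFlag rest (decide (¬ c = PySem.Chars.lowerChar c)) := by
  by_cases hc : c = PySem.Chars.lowerChar c
  · rw [decide_eq_false (not_not_intro hc)]
    show (if c ≠ PySem.Chars.lowerChar c then lbuFlag rest true
          else if (false : Bool) then false else lbuFlag rest false) = lbuFlag rest false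
    rw [if_neg (not_not_intro hc)]
    rfl
  · rw [decide_eq_true hc]
    show (if c ≠ PySem.Chars.lowerChar c then lbuFlag rest true
          else if (false : Bool) then false else lbuFlag rest false) = lbuFlag rest true
    rw [if_pos hc]

-- A's two phases starting at index i compute B's flag pass over the suffix from i
theorem lbu_main (cs : List Char) (i : Nat) (h : i < cs.length) :
    lbuFor cs (lbuWhile cs i + 1) = lbuFlag (cs.drop i) false := by
  fun_induction lbuWhile cs i with
  | case1 i h' hl hlast ih =>
    rw [List.drop_eq_getElem_cons h']
    have := ih (by omega)
    simp only [lbuFlag, not_not_intro hl, if_false, Bool.false_eq_true]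
    exact this
  | case2 i h' hl hlast =>
    -- i is the last index and cs[i] is lowercase: the for range is empty, B's pass ends
    rw [List.drop_eq_getElem_cons h']
    rw [List.drop_eq_nil_of_le (by omega)]
    unfold lbuFor
    rw [dif_neg (by omega)]
    show true = (if cs[i] ≠ PySem.Chars.lowerChar cs[i] then lbuFlag [] true
                 else if (false : Bool) then false else lbuFlag [] false)
    rw [if_neg (not_not_intro hl)]
    rfl
  | case3 i h' hl =>
    rw [List.drop_eq_getElem_cons h']
    show lbuFor cs (i + 1) = (if cs[i] ≠ PySem.Chars.lowerChar cs[i] then lbuFlag (cs.drop (i + 1)) true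
                 else if (false : Bool) then false else lbuFlag (cs.drop (i + 1)) false)
    rw [if_pos hl]
    exact lbuFor_eq_flag_true cs (i + 1)
  | case4 i h' => omega

-- ===== VERDICT (by name: the statement is the Claim_ definition above) =====
theorem lowercase_before_uppercase_spec : Claim_equal_lowercase_before_uppercase := by
  intro s _ hpre
  unfold Spec_lowercase_before_uppercase lowercase_before_uppercase lowercase_before_uppercase_alt
  have hne : s.toList ≠ [] := fun h => hpre (String.toList_eq_nil_iff.mp h)
  cases hcs : s.toList with
  | nil => exact absurd hcs hne
  | cons c rest =>
    show lbuFor (c :: rest) (lbuWhile (c :: rest) 0 + 1) = lbuFlag rest (decide (¬ c = PySem.Chars.lowerChar c))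
    have h0 : 0 < (c :: rest).length := by simp
    rw [lbu_main (c :: rest) 0 h0, List.drop_zero]
    exact lbuFlag_head c rest
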